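-- pv_equiv track=rewrite | github.com/MarcelJanicek/OpenClaw_DATA | compliance-agent/scripts/evaluate_docx_llm.py | expand_window
-- ===== SOURCE A (Python) =====
-- from typing import Any, Dict, List, Tuple
--
-- def expand_window(indices: List[int], radius: int, max_total: int) -> List[int]:
--     s = set()
--     for i in indices:
--         for j in range(i - radius, i + radius + 1):
--             if j >= 0:
--                 s.add(j)
--     out = sorted(s)
--     if len(out) > max_total:
--         return out[:max_total]
--     return out
-- ===== SOURCE B (Python) =====
-- def expand_window(indices, radius, max_total):
--     # sort the distinct indices, sweep once with a cursor, stop at max_total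
--     out = []
--     nxt = 0  # smallest value not yet considered (also enforces j >= 0)
--     for i in sorted(set(indices)):
--         hi = i + radius
--         j = max(nxt, i - radius)
--         while j <= hi and len(out) < max_total:
--             out.append(j)
--             j += 1
--         if hi + 1 > nxt:
--             nxt = hi + 1
--         if len(out) >= max_total:
--             break
--     return out
-- ===== Notes on version B (the rewrite author's own statement) =====
-- stated objective: faster
-- what changed: Instead of materialising every value in each index±radius window into a set and sorting that set, B sorts the distinct indices once and sweeps them with a cursor, emitting values in increasing order directly and stopping as soon as max_total values are produced.
-- outside the precondition, e.g. on expand_window([0], 1, -1): A returns [0], B returns []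
import Mathlib
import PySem

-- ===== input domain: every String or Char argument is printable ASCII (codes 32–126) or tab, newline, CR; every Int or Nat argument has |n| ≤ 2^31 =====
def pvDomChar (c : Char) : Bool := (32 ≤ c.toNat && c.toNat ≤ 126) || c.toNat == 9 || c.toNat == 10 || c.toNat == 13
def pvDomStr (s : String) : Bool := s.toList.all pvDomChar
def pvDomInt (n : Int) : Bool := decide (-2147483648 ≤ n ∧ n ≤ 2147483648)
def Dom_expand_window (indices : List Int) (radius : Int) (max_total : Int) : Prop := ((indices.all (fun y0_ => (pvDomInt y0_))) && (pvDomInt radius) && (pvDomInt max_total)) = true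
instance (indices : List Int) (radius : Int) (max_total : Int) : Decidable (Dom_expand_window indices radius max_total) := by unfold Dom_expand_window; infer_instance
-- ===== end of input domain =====

-- B sorts the distinct indices once and sweeps them with a cursor, emitting the union's
-- values in increasing order with an early stop at max_total, instead of materialising
-- every window value into a set and sorting it (objective: faster).

-- ===== PORT A =====
def expand_window (indices : List Int) (radius : Int) (max_total : Int) : List Int :=
  let s : PySem.Set Int := indices.foldl (fun s i =>
    (PySem.List.pyRange (i - radius) (i + radius + 1) 1).foldl
      (fun s j => if 0 ≤ j then PySem.Set.add s j else s) s) PySem.Set.empty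
  let out := PySem.List.sorted s (fun x => x) false
  if (out.length : Int) > max_total then PySem.List.slice out none (some max_total) else out

-- ===== PORT B =====
-- inner `while j <= hi and len(out) < max_total` loop of Source B
def ewEmit (hi max_total : Int) (j : Int) (out : List Int) : List Int :=
  if _h : j ≤ hi ∧ (out.length : Int) < max_total then
    ewEmit hi max_total (j + 1) (out ++ [j])
  else out
termination_by (hi + 1 - j).toNat
decreasing_by omega

-- outer `for i in sorted(set(indices))` loop of Source B (early `break` = returning out)
def ewSweep (radius max_total : Int) : List Int → List Int → Int → List Int
  | [], out, _ => out
  | i :: rest, out, nxt =>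
    let hi := i + radius
    let out' := ewEmit hi max_total (max nxt (i - radius)) out
    let nxt' := if hi + 1 > nxt then hi + 1 else nxt
    if (out'.length : Int) ≥ max_total then out'
    else ewSweep radius max_total rest out' nxt'

def expand_window_alt (indices : List Int) (radius : Int) (max_total : Int) : List Int :=
  ewSweep radius max_total
    (PySem.List.sorted (PySem.Set.ofList indices) (fun x => x) false) [] 0

-- ===== PRECONDITION & SPEC =====
-- Pre_ restricts to the function's natural domain of a nonnegative cap: for negative
-- max_total A still returns a value, but it is Python's negative-slice artefact
-- out[:max_total] (dropping elements from the END), which B does not reproduce.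
def Pre_expand_window (indices : List Int) (radius : Int) (max_total : Int) : Prop :=
  0 ≤ max_total

instance (indices : List Int) (radius : Int) (max_total : Int) : Decidable (Pre_expand_window indices radius max_total) := by unfold Pre_expand_window; infer_instance

def pvWitness_expand_window : List Int × Int × Int := ([0, 5, 3], 1, 4)

def Spec_expand_window (indices : List Int) (radius : Int) (max_total : Int) (out : List Int) : Prop := out = expand_window_alt indices radius max_total
instance (indices : List Int) (radius : Int) (max_total : Int) (out : List Int) : Decidable (Spec_expand_window indices radius max_total out) := by unfold Spec_expand_window; infer_instance

-- ===== CLAIM (what is proved, stated in full; the proofs are below) =====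
def Claim_equal_expand_window : Prop := ∀ (indices : List Int) (radius : Int) (max_total : Int), Dom_expand_window indices radius max_total → Pre_expand_window indices radius max_total → Spec_expand_window indices radius max_total (expand_window indices radius max_total)

-- ===== LEMMAS AND PROOFS =====

-- uncapped form of B's sweep
def ewFull (radius : Int) : List Int → Int → List Int
  | [], _ => []
  | i :: rest, nxt =>
    PySem.List.pyRange (max nxt (i - radius)) (i + radius + 1) 1 ++
      ewFull radius rest (max nxt (i + radius + 1))

-- A-side: membership of the inner fold
lemma mem_inner_fold (l : List Int) (s0 : PySem.Set Int) (x : Int) :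
    x ∈ l.foldl (fun s j => if 0 ≤ j then PySem.Set.add s j else s) s0 ↔
      x ∈ s0 ∨ (x ∈ l ∧ 0 ≤ x) := by
  induction l generalizing s0 with
  | nil => simp
  | cons a l ih =>
    simp only [List.foldl_cons, ih, List.mem_cons]
    split_ifs with h
    · simp [PySem.Set.mem_add]; constructor
      · rintro ((h1 | rfl) | h2)
        · exact Or.inl h1
        · exact Or.inr ⟨Or.inl rfl, h⟩
        · exact Or.inr ⟨Or.inr h2.1, h2.2⟩
      · rintro (h1 | ⟨(rfl | h2), hx⟩)
        · exact Or.inl (Or.inl h1)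
        · exact Or.inl (Or.inr rfl)
        · exact Or.inr ⟨h2, hx⟩
    · constructor
      · rintro (h1 | h2)
        · exact Or.inl h1
        · exact Or.inr ⟨Or.inr h2.1, h2.2⟩
      · rintro (h1 | ⟨(rfl | h2), hx⟩)
        · exact Or.inl h1
        · exact absurd hx h
        · exact Or.inr ⟨h2, hx⟩

lemma nodup_inner_fold (l : List Int) (s0 : PySem.Set Int) (h : s0.Nodup) :
    (l.foldl (fun s j => if 0 ≤ j then PySem.Set.add s j else s) s0).Nodup := by
  induction l generalizing s0 with
  | nil => exact h
  | cons a l ih =>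
    simp only [List.foldl_cons]
    split_ifs with ha
    · exact ih _ (PySem.Set.nodup_add _ _ h)
    · exact ih _ h

lemma mem_A_set (indices : List Int) (radius : Int) (s0 : PySem.Set Int) (x : Int) :
    x ∈ indices.foldl (fun s i =>
      (PySem.List.pyRange (i - radius) (i + radius + 1) 1).foldl
        (fun s j => if 0 ≤ j then PySem.Set.add s j else s) s) s0 ↔
      x ∈ s0 ∨ (0 ≤ x ∧ ∃ i ∈ indices, i - radius ≤ x ∧ x ≤ i + radius) := by
  induction indices generalizing s0 with
  | nil => simp
  | cons a l ih =>
    simp only [List.foldl_cons, ih, mem_inner_fold, PySem.List.mem_pyRange_one,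
      List.mem_cons]
    constructor
    · rintro ((h1 | ⟨⟨h2, h3⟩, h4⟩) | ⟨hx, i, hi, h5, h6⟩)
      · exact Or.inl h1
      · exact Or.inr ⟨h4, a, Or.inl rfl, by omega, by omega⟩
      · exact Or.inr ⟨hx, i, Or.inr hi, h5, h6⟩
    · rintro (h1 | ⟨hx, i, (rfl | hi), h5, h6⟩)
      · exact Or.inl (Or.inl h1)
      · exact Or.inl (Or.inr ⟨⟨by omega, by omega⟩, hx⟩)
      · exact Or.inr ⟨hx, i, hi, h5, h6⟩

lemma nodup_A_set (indices : List Int) (radius : Int) :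
    (indices.foldl (fun s i =>
      (PySem.List.pyRange (i - radius) (i + radius + 1) 1).foldl
        (fun s j => if 0 ≤ j then PySem.Set.add s j else s) s) PySem.Set.empty).Nodup := by
  have : ∀ (l : List Int) (s0 : PySem.Set Int), s0.Nodup →
      (l.foldl (fun s i =>
        (PySem.List.pyRange (i - radius) (i + radius + 1) 1).foldl
          (fun s j => if 0 ≤ j then PySem.Set.add s j else s) s) s0).Nodup := by
    intro l
    induction l with
    | nil => intro s0 h; exact h
    | cons a l ih =>
      intro s0 h
      exact ih _ (nodup_inner_fold _ _ h)
  exact this indices PySem.Set.empty (by simp [PySem.Set.empty])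

-- pairwise ≤ and nodup give pairwise <
lemma pairwise_lt_of_le_nodup {l : List Int}
    (h1 : l.Pairwise (· ≤ ·)) (h2 : l.Nodup) : l.Pairwise (· < ·) := by
  induction l with
  | nil => exact List.Pairwise.nil
  | cons a l ih =>
    rw [List.pairwise_cons] at h1 ⊢
    rw [List.nodup_cons] at h2
    refine ⟨fun b hb => lt_of_le_of_ne (h1.1 b hb) ?_, ih h1.2 h2.2⟩
    intro rfl'; exact h2.1 (rfl' ▸ hb)

-- two strictly increasing lists with the same members are equal
lemma eq_of_pairwise_lt_of_mem_iff :
    ∀ {l1 l2 : List Int}, l1.Pairwise (· < ·) → l2.Pairwise (· < ·) →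
    (∀ x, x ∈ l1 ↔ x ∈ l2) → l1 = l2 := by
  intro l1
  induction l1 with
  | nil =>
    intro l2 _ _ hm
    cases l2 with
    | nil => rfl
    | cons b l2 => exact absurd ((hm b).2 (List.mem_cons_self)) (by simp)
  | cons a l1 ih =>
    intro l2 h1 h2 hm
    cases l2 with
    | nil => exact absurd ((hm a).1 (List.mem_cons_self)) (by simp)
    | cons b l2 =>
      rw [List.pairwise_cons] at h1 h2
      have hab : a = b := by
        have ha := (hm a).1 (List.mem_cons_self)
        have hb := (hm b).2 (List.mem_cons_self)
        rcases List.mem_cons.1 ha with h | h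
        · exact h
        · rcases List.mem_cons.1 hb with h' | h'
          · exact h'.symm
          · have := h2.1 a h; have := h1.1 b h'; omega
      subst hab
      congr 1
      refine ih h1.2 h2.2 (fun x => ⟨fun hx => ?_, fun hx => ?_⟩)
      · have := h1.1 x hx
        rcases List.mem_cons.1 ((hm x).1 (List.mem_cons_of_mem _ hx)) with h | h
        · omega
        · exact h
      · have := h2.1 x hx
        rcases List.mem_cons.1 ((hm x).2 (List.mem_cons_of_mem _ hx)) with h | h
        · omega
        · exact h

-- B-side: everything ewFull emits is ≥ nxt … and membership, given sorted starts
lemma mem_ewFull (radius : Int) :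
    ∀ (starts : List Int) (nxt x : Int), starts.Pairwise (· ≤ ·) →
    (x ∈ ewFull radius starts nxt ↔
      nxt ≤ x ∧ ∃ i ∈ starts, i - radius ≤ x ∧ x ≤ i + radius) := by
  intro starts
  induction starts with
  | nil => intro nxt x _; simp [ewFull]
  | cons a rest ih =>
    intro nxt x hs
    rw [List.pairwise_cons] at hs
    simp only [ewFull, List.mem_append, PySem.List.mem_pyRange_one, ih _ _ hs.2,
      List.mem_cons]
    constructor
    · rintro (⟨h1, h2⟩ | ⟨h1, i, hi, h2, h3⟩)
      · exact ⟨by omega, a, Or.inl rfl, by omega, by omega⟩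
      · exact ⟨by omega, i, Or.inr hi, h2, h3⟩
    · rintro ⟨hn, i, (rfl | hi), h2, h3⟩
      · exact Or.inl ⟨by omega, by omega⟩
      · by_cases hx : x ≤ a + radius
        · have := hs.1 i hi
          exact Or.inl ⟨by omega, by omega⟩
        · exact Or.inr ⟨by omega, i, hi, h2, h3⟩

lemma pairwise_lt_ewFull (radius : Int) :
    ∀ (starts : List Int) (nxt : Int), starts.Pairwise (· ≤ ·) →
    (ewFull radius starts nxt).Pairwise (· < ·) := by
  intro starts
  induction starts with
  | nil => intro nxt _; simp [ewFull]
  | cons a rest ih =>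
    intro nxt hs
    rw [List.pairwise_cons] at hs
    rw [ewFull, List.pairwise_append]
    refine ⟨PySem.List.pairwise_lt_pyRange_one _ _, ih _ hs.2, ?_⟩
    intro x hx y hy
    rw [PySem.List.mem_pyRange_one] at hx
    have := ((mem_ewFull radius rest _ y hs.2).1 hy).1
    omega

-- the capped inner loop is `take` of a range
lemma ewEmit_eq_take (hi max_total : Int) :
    ∀ (j : Int) (out : List Int),
    ewEmit hi max_total j out =
      out ++ (PySem.List.pyRange j (hi + 1) 1).take (max_total - out.length).toNat := by
  intro j
  have H : ∀ (n : Nat) (j : Int) (out : List Int), (hi + 1 - j).toNat = n →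
      ewEmit hi max_total j out =
        out ++ (PySem.List.pyRange j (hi + 1) 1).take (max_total - out.length).toNat := by
    intro n
    induction n with
    | zero =>
      intro j out hn
      rw [ewEmit]
      have hj : hi < j := by omega
      rw [PySem.List.pyRange_one_eq_nil (by omega)]
      simp
      omega
    | succ n ihn =>
      intro j out hn
      rw [ewEmit]
      by_cases hcap : (out.length : Int) < max_total
      · have hj : j ≤ hi := by omega
        rw [dif_pos ⟨hj, hcap⟩, ihn (j + 1) (out ++ [j]) (by omega)]
        conv_rhs => rw [PySem.List.pyRange_one_cons (show j < hi + 1 by omega)]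
        have h1 : (max_total - ((out ++ [j]).length : Int)).toNat + 1 = (max_total - (out.length : Int)).toNat := by
          simp only [List.length_append, List.length_cons, List.length_nil]
          push_cast
          omega
        rw [← h1, List.take_succ_cons]
        simp
      · rw [dif_neg (by tauto)]
        have : (max_total - out.length).toNat = 0 := by omega
        simp [this]
  exact fun out => H (hi + 1 - j).toNat j out rfl

-- the capped sweep is `take` of the uncapped enumeration
lemma ewSweep_eq_take (radius max_total : Int) :
    ∀ (starts : List Int) (out : List Int) (nxt : Int),
    ewSweep radius max_total starts out nxt =
      out ++ (ewFull radius starts nxt).take (max_total - out.length).toNat := by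
  intro starts
  induction starts with
  | nil => intro out nxt; simp [ewSweep, ewFull]
  | cons a rest ih =>
    intro out nxt
    rw [ewSweep, ewFull]
    simp only [ewEmit_eq_take]
    set block := (PySem.List.pyRange (max nxt (a - radius)) (a + radius + 1) 1) with hblock
    have hmax : (if a + radius + 1 > nxt then a + radius + 1 else nxt) = max nxt (a + radius + 1) := by
      split_ifs <;> omega
    rw [hmax]
    set b : Nat := (max_total - out.length).toNat with hb
    rw [List.take_append]
    by_cases hstop : (((out ++ block.take b).length : Int) ≥ max_total)
    · rw [if_pos hstop]
      have : (b - block.length = 0) := by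
        simp at hstop
        have hmin : (block.take b).length = min b block.length := by simp
        omega
      rw [this]
      simp
    · rw [if_neg hstop]
      rw [ih]
      have hfull : block.take b = block := by
        apply List.take_of_length_le
        simp at hstop
        have hmin : (block.take b).length = min b block.length := by simp
        omega
      have harith : (max_total - ((out ++ block.take b).length : Int)).toNat = b - block.length := by
        simp [hfull] at hstop ⊢
        omega
      rw [harith, hfull, List.append_assoc]

-- ===== VERDICT (by name: the statement is the Claim_ definition above) =====
theorem expand_window_spec : Claim_equal_expand_window := by
  intro indices radius max_total _hdom hpre
  unfold Spec_expand_window expand_window expand_window_alt Pre_expand_window at *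
  -- A's sorted list
  set s := indices.foldl (fun s i =>
    (PySem.List.pyRange (i - radius) (i + radius + 1) 1).foldl
      (fun s j => if 0 ≤ j then PySem.Set.add s j else s) s) (PySem.Set.empty) with hs
  set outA := PySem.List.sorted s (fun x => x) false with houtA
  set starts := PySem.List.sorted (PySem.Set.ofList indices) (fun x => x) false with hstarts
  have hstarts_le : starts.Pairwise (· ≤ ·) := PySem.List.sorted_pairwise _ _
  -- outA pairwise <
  have hA_le : outA.Pairwise (· ≤ ·) := PySem.List.sorted_pairwise _ _
  have hA_nodup : outA.Nodup :=
    ((PySem.List.sorted_perm s (fun x => x) false).nodup_iff).2 (nodup_A_set indices radius)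
  have hA_lt : outA.Pairwise (· < ·) := pairwise_lt_of_le_nodup hA_le hA_nodup
  -- B's full list pairwise <
  have hB_lt : (ewFull radius starts 0).Pairwise (· < ·) :=
    pairwise_lt_ewFull radius starts 0 hstarts_le
  -- same membership
  have hmem : ∀ x, x ∈ outA ↔ x ∈ ewFull radius starts 0 := by
    intro x
    rw [houtA, PySem.List.mem_sorted, hs, mem_A_set, mem_ewFull radius starts 0 x hstarts_le]
    simp only [PySem.Set.empty, List.not_mem_nil, false_or]
    constructor
    · rintro ⟨hx, i, hi, h1, h2⟩
      refine ⟨hx, i, ?_, h1, h2⟩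
      rw [hstarts, PySem.List.mem_sorted, PySem.Set.mem_ofList]
      exact hi
    · rintro ⟨hx, i, hi, h1, h2⟩
      rw [hstarts, PySem.List.mem_sorted, PySem.Set.mem_ofList] at hi
      exact ⟨hx, i, hi, h1, h2⟩
  have hAB : outA = ewFull radius starts 0 :=
    eq_of_pairwise_lt_of_mem_iff hA_lt hB_lt hmem
  rw [ewSweep_eq_take]
  simp only [List.nil_append, List.length_nil, Int.natCast_zero, sub_zero]
  rw [← hAB]
  simp only [← houtA]
  split_ifs with hlen
  · rw [PySem.List.slice_to _ hpre]
  · have hle : outA.length ≤ max_total.toNat := by omega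
    rw [List.take_of_length_le hle]
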